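-- pv_equiv track=rewrite | github.com/ShurikM/dbook | src/dbook/generators/lineage.py | _find_data_chains
-- ===== SOURCE A (Python) =====
-- def _find_data_chains(
--     edges: list[tuple[str, str, str]],
--     root_tables: list[str],
--     all_tables: set[str],
--     max_depth: int = 5,
-- ) -> list[list[str]]:
--     """Find data flow chains by following FK references from important root tables."""
--     # Build reverse adjacency: ref_table -> [tables that reference it]
--     reverse_adj: dict[str, list[str]] = {}
--     for from_t, to_t, _ in edges:
--         reverse_adj.setdefault(to_t, []).append(from_t)
--
--     chains: list[list[str]] = []
--     for root in root_tables[:5]:  # Top 5 root tables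
--         # BFS from root following reverse edges (who references me?)
--         visited = {root}
--         queue = [[root]]
--
--         while queue:
--             path = queue.pop(0)
--             current = path[-1]
--
--             if len(path) > max_depth:
--                 continue
--
--             children = reverse_adj.get(current, [])
--             if not children and len(path) > 1:
--                 # End of chain
--                 chains.append(list(reversed(path)))  # Reverse: show leaf -> root
--
--             for child in sorted(set(children)):
--                 if child not in visited:
--                     visited.add(child)
--                     queue.append(path + [child])
--
--     # Deduplicate and sort by length (longest chains first)
--     seen: set[str] = set()
--     unique_chains: list[list[str]] = []
--     for chain in sorted(chains, key=len, reverse=True):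
--         key = " -> ".join(chain)
--         if key not in seen:
--             seen.add(key)
--             unique_chains.append(chain)
--
--     return unique_chains[:10]
-- ===== SOURCE B (Python) =====
-- def _find_data_chains(
--     edges: list[tuple[str, str, str]],
--     root_tables: list[str],
--     all_tables: set[str],
--     max_depth: int = 5,
-- ) -> list[list[str]]:
--     """Find data flow chains by following FK references from important root tables."""
--     chains: list[list[str]] = []
--     for root in root_tables[:5]:
--         # BFS over single nodes; each node keeps a parent pointer and a depth.
--         # Children are found by a direct scan of the edge list (no adjacency dict).
--         parent: dict[str, str | None] = {root: None}
--         depth: dict[str, int] = {root: 1}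
--         visited = {root}
--         queue = [root]
--
--         while queue:
--             node = queue.pop(0)
--             d = depth[node]
--
--             if d > max_depth:
--                 continue
--
--             children = [f for f, t, _ in edges if t == node]
--             if not children and d > 1:
--                 # Dead end: rebuild the chain leaf -> root via parent pointers
--                 chain = []
--                 cur: str | None = node
--                 while cur is not None:
--                     chain.append(cur)
--                     cur = parent[cur]
--                 chains.append(chain)
--
--             for child in sorted(set(children)):
--                 if child not in visited:
--                     visited.add(child)
--                     parent[child] = node
--                     depth[child] = d + 1
--                     queue.append(child)
--
--     # Longest first (stable via negated length key); keep first occurrence of each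
--     # rendered key by comparing an element's position with its key's first index.
--     ordered = sorted(chains, key=lambda c: -len(c))
--     keys = [" -> ".join(c) for c in ordered]
--     unique_chains = [c for i, c in enumerate(ordered) if keys.index(keys[i]) == i]
--     return unique_chains[:10]
-- ===== Notes on version B (the rewrite author's own statement) =====
-- stated objective: alternative
-- what changed: B drops A's adjacency dict and queue-of-paths: children come from a direct scan of the edge list, the BFS queue holds single nodes with parent/depth dicts (chains rebuilt from parent pointers only at dead ends), and the final stage sorts by negated length and deduplicates by comparing each element's position with its key's first index instead of a seen-set fold.
import Mathlib
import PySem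

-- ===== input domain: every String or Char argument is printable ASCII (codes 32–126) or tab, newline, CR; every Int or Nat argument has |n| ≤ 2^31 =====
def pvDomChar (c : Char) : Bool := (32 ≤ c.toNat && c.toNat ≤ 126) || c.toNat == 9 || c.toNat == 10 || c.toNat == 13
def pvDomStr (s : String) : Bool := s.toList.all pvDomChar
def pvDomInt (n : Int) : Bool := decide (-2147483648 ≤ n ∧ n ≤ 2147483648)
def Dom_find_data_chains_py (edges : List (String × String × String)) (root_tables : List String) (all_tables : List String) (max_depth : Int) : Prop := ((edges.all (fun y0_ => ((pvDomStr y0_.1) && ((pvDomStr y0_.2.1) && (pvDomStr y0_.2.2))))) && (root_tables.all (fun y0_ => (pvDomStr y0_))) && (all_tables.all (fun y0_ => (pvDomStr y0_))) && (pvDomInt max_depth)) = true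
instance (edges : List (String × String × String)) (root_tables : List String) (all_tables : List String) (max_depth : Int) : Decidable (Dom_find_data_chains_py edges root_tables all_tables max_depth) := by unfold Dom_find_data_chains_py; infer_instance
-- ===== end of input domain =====

-- B drops A's adjacency dict and queue-of-paths: children come from a direct edge-list
-- scan, the BFS queue holds single nodes with parent/depth dicts (chains rebuilt from
-- parent pointers at dead ends), sorting uses a negated-length key and deduplication
-- keeps an element iff its key's first index equals its own position (objective:
-- alternative; no speed claim).

-- ===== PORT A =====
-- reverse_adj built by the setdefault/append loop
def pvA_radj (edges : List (String × String × String)) : PySem.Dict String (List String) :=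
  edges.foldl (fun d e => d.modify e.2.1 [] (fun l => l ++ [e.1])) PySem.Dict.empty

-- body of "for child in sorted(set(children)): ..." — state (visited, queue)
def pvA_step (path : List String) (st : PySem.Set String × List (List String)) (child : String) :
    PySem.Set String × List (List String) :=
  if st.1.contains child then st else (st.1.add child, st.2 ++ [path ++ [child]])

-- the "while queue:" loop; fuel is a Lean-ism: at most edges.length nodes are ever
-- enqueued besides the root (each newly visited node names a distinct edge), so
-- fuel = edges.length + 1 covers every dequeue and the 0-case is never reached.
def pvA_bfs (radj : PySem.Dict String (List String)) (maxd : Int) :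
    Nat → PySem.Set String → List (List String) → List (List String) → List (List String)
  | 0, _, _, chains => chains
  | fuel+1, visited, queue, chains =>
    match queue with
    | [] => chains
    | path :: rest =>
      -- current = path[-1]; queue paths are never empty, so the default is never used
      let current := (path.getLast?).getD ""
      if (path.length : Int) > maxd then
        pvA_bfs radj maxd fuel visited rest chains
      else
        let children := radj.getD current []
        let chains' := if children.isEmpty && decide (1 < path.length) then
            chains ++ [path.reverse] else chains
        let st := (PySem.List.sorted (PySem.Set.ofList children) (fun x => x) false).foldl
          (pvA_step path) (visited, rest)
        pvA_bfs radj maxd fuel st.1 st.2 chains'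

def find_data_chains_py (edges : List (String × String × String)) (root_tables : List String) (all_tables : List String) (max_depth : Int) : List (List String) :=
  let reverse_adj := pvA_radj edges
  let chains := (PySem.List.slice root_tables none (some 5)).foldl
    (fun chains root =>
      pvA_bfs reverse_adj max_depth (edges.length + 1) (PySem.Set.ofList [root]) [[root]] chains)
    []
  let st := (PySem.List.sorted chains (fun c => c.length) true).foldl
    (fun (st : PySem.Set String × List (List String)) chain =>
      let key := PySem.Str.join " -> " chain
      if st.1.contains key then st else (st.1.add key, st.2 ++ [chain]))
    (PySem.Set.empty, [])
  PySem.List.slice st.2 none (some 10)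

-- ===== PORT B =====
-- "children = [f for f, t, _ in edges if t == node]" — a direct scan, no dict
def pvB_children (edges : List (String × String × String)) (node : String) : List String :=
  (edges.filter (fun e => e.2.1 == node)).map (fun e => e.1)

-- "while cur is not None: chain.append(cur); cur = parent[cur]" — fuel is a Lean-ism:
-- parent pointers strictly ascend towards the root, so the chain has at most
-- parent.size elements and fuel = parent.size never runs out.
def pvB_chainOf (parent : PySem.Dict String (Option String)) : Nat → String → List String
  | 0, _ => []
  | fuel+1, cur =>
    cur :: (match parent.getD cur none with
            | none => []
            | some p => pvB_chainOf parent fuel p)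

-- body of "for child in sorted(set(children)): ..." — state (parent, depth, visited, queue)
def pvB_step (node : String) (d : Int)
    (st : PySem.Dict String (Option String) × PySem.Dict String Int × PySem.Set String × List String)
    (child : String) :
    PySem.Dict String (Option String) × PySem.Dict String Int × PySem.Set String × List String :=
  if st.2.2.1.contains child then st
  else (st.1.insert child (some node), st.2.1.insert child (d + 1), st.2.2.1.add child,
        st.2.2.2 ++ [child])

-- "while queue:" — same fuel remark as in port A
def pvB_bfs (edges : List (String × String × String)) (maxd : Int) :
    Nat → PySem.Dict String (Option String) → PySem.Dict String Int → PySem.Set String →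
    List String → List (List String) → List (List String)
  | 0, _, _, _, _, chains => chains
  | fuel+1, parent, depth, visited, queue, chains =>
    match queue with
    | [] => chains
    | node :: rest =>
      let d := depth.getD node 0
      if d > maxd then
        pvB_bfs edges maxd fuel parent depth visited rest chains
      else
        let children := pvB_children edges node
        let chains' := if children.isEmpty && decide (1 < d) then
            chains ++ [pvB_chainOf parent parent.size node] else chains
        let st := (PySem.List.sorted (PySem.Set.ofList children) (fun x => x) false).foldl
          (pvB_step node d) (parent, depth, visited, rest)
        pvB_bfs edges maxd fuel st.1 st.2.1 st.2.2.1 st.2.2.2 chains'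

def find_data_chains_py_alt (edges : List (String × String × String)) (root_tables : List String) (all_tables : List String) (max_depth : Int) : List (List String) :=
  let chains := (root_tables.take 5).foldl
    (fun chains root =>
      pvB_bfs edges max_depth (edges.length + 1)
        (PySem.Dict.empty.insert root none) (PySem.Dict.empty.insert root 1)
        (PySem.Set.ofList [root]) [root] chains)
    []
  let ordered := PySem.List.sorted chains (fun c => -((c.length : Int))) false
  let ks := ordered.map (fun c => PySem.Str.join " -> " c)
  -- "keys.index(keys[i]) == i": keys[i] is the rendered key of the i-th element p.2
  let unique := ((PySem.List.enumerate ordered).filter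
      (fun p => ((PySem.List.index? ks (PySem.Str.join " -> " p.2)).map (fun (n : Nat) => (n : Int))) == some p.1)).map
      (fun p => p.2)
  unique.take 10

-- ===== PRECONDITION & SPEC =====
def Spec_find_data_chains_py (edges : List (String × String × String)) (root_tables : List String) (all_tables : List String) (max_depth : Int) (out : List (List String)) : Prop := out = find_data_chains_py_alt edges root_tables all_tables max_depth
instance (edges : List (String × String × String)) (root_tables : List String) (all_tables : List String) (max_depth : Int) (out : List (List String)) : Decidable (Spec_find_data_chains_py edges root_tables all_tables max_depth out) := by unfold Spec_find_data_chains_py; infer_instance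

-- ===== CLAIM (what is proved, stated in full; the proofs are below) =====
def Claim_equal_find_data_chains_py : Prop := ∀ (edges : List (String × String × String)) (root_tables : List String) (all_tables : List String) (max_depth : Int), Dom_find_data_chains_py edges root_tables all_tables max_depth → Spec_find_data_chains_py edges root_tables all_tables max_depth (find_data_chains_py edges root_tables all_tables max_depth)

-- ===== LEMMAS AND PROOFS =====

-- A's adjacency lookup is B's direct scan
theorem pv_radj_children (edges : List (String × String × String)) (t : String) :
    (pvA_radj edges).getD t [] = pvB_children edges t := by
  unfold pvA_radj pvB_children
  have h := PySem.Dict.getD_foldl_modify_append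
    (l := edges.map (fun e => (e.2.1, e.1))) (d := PySem.Dict.empty) (c := t)
  rw [List.foldl_map] at h
  simpa [PySem.Dict.getD_empty, List.filter_map, List.map_map, Function.comp] using h

-- the parent-pointer chain of node n in B's parent dict is the list l (leaf → root)
inductive PvChain (P : PySem.Dict String (Option String)) : String → List String → Prop
  | stop (n : String) (h : P.getD n none = none) : PvChain P n [n]
  | step (n p : String) (l : List String) (h : P.getD n none = some p)
      (hl : PvChain P p l) : PvChain P n (n :: l)

-- invariant tying an A-queue entry (a root-first path q) to a B-queue entry (its last node)
def PvQInv (P : PySem.Dict String (Option String)) (Dep : PySem.Dict String Int)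
    (V : PySem.Set String) (q : List String) (n : String) : Prop :=
  PvChain P n q.reverse ∧ q.reverse.Nodup ∧
  (∀ m ∈ q, P.contains m = true ∧ V.contains m = true) ∧
  Dep.getD n 0 = (q.length : Int)

theorem pvChain_head {P : PySem.Dict String (Option String)} {n : String} {l : List String}
    (h : PvChain P n l) : l.head? = some n := by
  cases h <;> rfl

theorem pvChain_eval (P : PySem.Dict String (Option String)) {n : String} {l : List String}
    (h : PvChain P n l) : ∀ fuel, l.length ≤ fuel → pvB_chainOf P fuel n = l := by
  induction h with
  | stop n hn =>
    intro fuel hf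
    match fuel, hf with
    | f+1, _ => simp [pvB_chainOf, hn]
  | step n p l hp _ ih =>
    intro fuel hf
    match fuel, hf with
    | f+1, hf =>
      simp only [pvB_chainOf, hp]
      simp only [List.length_cons, Nat.add_le_add_iff_right] at hf
      rw [ih f hf]

theorem pvChain_insert {P : PySem.Dict String (Option String)} {n : String} {l : List String}
    (h : PvChain P n l) (child : String) (v : Option String) (hc : ∀ m ∈ l, m ≠ child) :
    PvChain (P.insert child v) n l := by
  induction h with
  | stop n hn =>
    exact PvChain.stop n (by
      rw [PySem.Dict.getD_insert_of_ne _ _ _ (hc n (by simp))]; exact hn)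
  | step n p l hp _ ih =>
    exact PvChain.step n p l (by
      rw [PySem.Dict.getD_insert_of_ne _ _ _ (hc n (by simp))]; exact hp)
      (ih (fun m hm => hc m (by simp [hm])))

theorem pv_set_contains_iff {s : PySem.Set String} {x : String} :
    s.contains x = true ↔ x ∈ s := by
  simp [PySem.Set.contains]

theorem pv_not_mem_of_contains_false {s : PySem.Set String} {x : String}
    (hc : s.contains x = false) : x ∉ s := by
  intro h
  rw [pv_set_contains_iff.mpr h] at hc
  cases hc

-- length of a chain is bounded by the number of parent entries
theorem pvChain_len_le_size {P : PySem.Dict String (Option String)}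
    {l : List String} (hnd : l.Nodup) (hk : ∀ m ∈ l, P.contains m = true) :
    l.length ≤ P.size := by
  have hsub : l ⊆ P.keys := fun m hm => (PySem.Dict.contains_iff_mem_keys P m).mp (hk m hm)
  have : l.length ≤ P.keys.length := by
    calc l.length = l.toFinset.card := (List.toFinset_card_of_nodup hnd).symm
      _ ≤ P.keys.toFinset.card := Finset.card_le_card (fun x hx => by
          simp only [List.mem_toFinset] at *; exact hsub hx)
      _ ≤ P.keys.length := P.keys.toFinset_card_le
  simpa [PySem.Dict.keys, PySem.Dict.size] using this

-- one fresh child insertion preserves the invariant of any live entry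
theorem pvQInv_pres {P Dep V q m} (h : PvQInv P Dep V q m) {child : String}
    (hc : V.contains child = false) (v : Option String) (dd : Int) :
    PvQInv (P.insert child v) (Dep.insert child dd) (V.add child) q m := by
  obtain ⟨hch, hnd, hmem, hdep⟩ := h
  have hne : ∀ x ∈ q, x ≠ child := by
    intro x hx hxe
    rw [hxe] at hx
    exact absurd (pv_set_contains_iff.mp (hmem child hx).2) (pv_not_mem_of_contains_false hc)
  have hm_mem : m ∈ q := by
    have := pvChain_head hch
    have : m ∈ q.reverse := by
      cases hq : q.reverse with
      | nil => simp [hq] at this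
      | cons a t => rw [hq] at this; simp at this; simp [this]
    simpa using this
  refine ⟨pvChain_insert hch child v (fun x hx => hne x (by simpa using hx)), hnd, ?_, ?_⟩
  · intro x hx
    refine ⟨?_, ?_⟩
    · rw [PySem.Dict.contains_insert]
      simp [(hmem x hx).1]
    · rw [pv_set_contains_iff]
      exact (PySem.Set.mem_add V child x).mpr (Or.inl (pv_set_contains_iff.mp (hmem x hx).2))
  · rw [PySem.Dict.getD_insert_of_ne _ _ _ (hne m hm_mem)]
    exact hdep

-- the freshly enqueued entry satisfies the invariant
theorem pvQInv_new {P Dep V q m} (h : PvQInv P Dep V q m) {child : String}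
    (hc : V.contains child = false) (d : Int) (hd : d = (q.length : Int)) :
    PvQInv (P.insert child (some m)) (Dep.insert child (d + 1)) (V.add child)
      (q ++ [child]) child := by
  obtain ⟨hch, hnd, hmem, _⟩ := h
  have hne : ∀ x ∈ q.reverse, x ≠ child := by
    intro x hx hxe
    rw [hxe] at hx
    exact absurd (pv_set_contains_iff.mp (hmem child (by simpa using hx)).2)
      (pv_not_mem_of_contains_false hc)
  have hrev : (q ++ [child]).reverse = child :: q.reverse := by simp
  refine ⟨?_, ?_, ?_, ?_⟩
  · rw [hrev]
    exact PvChain.step child m q.reverse (PySem.Dict.getD_insert_self _ _ _ _)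
      (pvChain_insert hch child (some m) hne)
  · rw [hrev]
    exact List.Nodup.cons (fun hx => (hne child hx) rfl) hnd
  · intro x hx
    rcases List.mem_append.mp hx with hx | hx
    · refine ⟨?_, ?_⟩
      · rw [PySem.Dict.contains_insert]; simp [(hmem x hx).1]
      · rw [pv_set_contains_iff]
        exact (PySem.Set.mem_add V child x).mpr (Or.inl (pv_set_contains_iff.mp (hmem x hx).2))
    · simp only [List.mem_singleton] at hx
      subst hx
      refine ⟨by rw [PySem.Dict.contains_insert]; simp, ?_⟩
      rw [pv_set_contains_iff]
      exact (PySem.Set.mem_add V x x).mpr (Or.inr rfl)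
  · rw [PySem.Dict.getD_insert_self]
    simp [hd]

-- the two per-children folds stay synchronized
theorem pv_fold_sync (p : List String) (m : String) (d : Int) (hd : d = (p.length : Int)) :
    ∀ (cs : List String) P Dep V (qA : List (List String)) (qB : List String),
    PvQInv P Dep V p m →
    List.Forall₂ (fun q n => PvQInv P Dep V q n) qA qB →
    (cs.foldl (pvA_step p) (V, qA)).1 = (cs.foldl (pvB_step m d) (P, Dep, V, qB)).2.2.1 ∧
    PvQInv (cs.foldl (pvB_step m d) (P, Dep, V, qB)).1
      (cs.foldl (pvB_step m d) (P, Dep, V, qB)).2.1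
      (cs.foldl (pvB_step m d) (P, Dep, V, qB)).2.2.1 p m ∧
    List.Forall₂ (fun q n => PvQInv (cs.foldl (pvB_step m d) (P, Dep, V, qB)).1
        (cs.foldl (pvB_step m d) (P, Dep, V, qB)).2.1
        (cs.foldl (pvB_step m d) (P, Dep, V, qB)).2.2.1 q n)
      (cs.foldl (pvA_step p) (V, qA)).2 (cs.foldl (pvB_step m d) (P, Dep, V, qB)).2.2.2 := by
  intro cs
  induction cs with
  | nil =>
    intro P Dep V qA qB hp hall
    exact ⟨rfl, hp, hall⟩
  | cons c cs ih =>
    intro P Dep V qA qB hp hall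
    simp only [List.foldl_cons]
    by_cases hc : V.contains c = true
    · rw [show pvA_step p (V, qA) c = (V, qA) by simp only [pvA_step, hc]; rfl,
          show pvB_step m d (P, Dep, V, qB) c = (P, Dep, V, qB) by simp only [pvB_step, hc]; rfl]
      exact ih P Dep V qA qB hp hall
    · have hc' : V.contains c = false := by simpa using hc
      rw [show pvA_step p (V, qA) c = (V.add c, qA ++ [p ++ [c]]) by
            simp only [pvA_step, hc']; rfl,
          show pvB_step m d (P, Dep, V, qB) c
              = (P.insert c (some m), Dep.insert c (d+1), V.add c, qB ++ [c]) by
            simp only [pvB_step, hc']; rfl]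
      exact ih _ _ _ _ _ (pvQInv_pres hp hc' _ _)
        (List.rel_append
          (hall.imp (fun _ _ hq => pvQInv_pres hq hc' _ _))
          (List.forall₂_cons.mpr ⟨pvQInv_new hp hc' d hd, List.Forall₂.nil⟩))

-- the two BFS loops agree whenever their queues are related entrywise
set_option maxHeartbeats 1000000 in
theorem pv_bfs_sync (edges : List (String × String × String)) (maxd : Int) :
    ∀ (fuel : Nat) P Dep V (qA : List (List String)) (qB : List String) chains,
    List.Forall₂ (fun q n => PvQInv P Dep V q n) qA qB →
    pvA_bfs (pvA_radj edges) maxd fuel V qA chains = pvB_bfs edges maxd fuel P Dep V qB chains := by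
  intro fuel
  induction fuel with
  | zero => intro P Dep V qA qB chains _; rfl
  | succ f ih =>
    intro P Dep V qA qB chains hall
    cases hall with
    | nil => rfl
    | @cons q n qA' qB' hq htl =>
      obtain ⟨hch, hnd, hmem, hdep⟩ := hq
      have hlast : q.getLast? = some n := by
        rw [← List.head?_reverse]; exact pvChain_head hch
      simp only [pvA_bfs, pvB_bfs, hlast, Option.getD_some, hdep]
      by_cases hgt : (q.length : Int) > maxd
      · rw [if_pos hgt, if_pos hgt]
        exact ih P Dep V qA' qB' chains htl
      · rw [if_neg hgt, if_neg hgt]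
        have hdec : decide (1 < q.length) = decide ((1 : Int) < (q.length : Int)) := by
          simp
        have hchain : pvB_chainOf P P.size n = q.reverse :=
          pvChain_eval P hch P.size
            (by
              have := pvChain_len_le_size hnd
                (fun m hm => (hmem m (by simpa using hm)).1)
              simpa using this)
        obtain ⟨hV, hp', hall'⟩ :=
          pv_fold_sync q n ((q.length : Int)) rfl
            (PySem.List.sorted (PySem.Set.ofList (pvB_children edges n)) (fun x => x) false)
            P Dep V qA' qB' ⟨hch, hnd, hmem, hdep⟩ htl
        rw [pv_radj_children, hdec, hchain] at *
        rw [hV]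
        exact ih _ _ _ _ _ _ hall'

-- length-descending stable sort = stable sort by the negated length
theorem pv_sort_eq (chains : List (List String)) :
    PySem.List.sorted chains (fun c => c.length) true
      = PySem.List.sorted chains (fun c => -((c.length : Int))) false := by
  rw [PySem.List.sorted_rev_eq_foldl_insertBy, PySem.List.sorted_eq_foldl_insertBy]
  have hpred : (fun (a b : List String) => decide (b.length < a.length))
      = (fun (a b : List String) => decide (-((a.length : Int)) < -((b.length : Int)))) := by
    funext a b
    rw [decide_eq_decide]
    omega
  rw [hpred]

-- first-occurrence filter, shared normal form of both dedup stages
def pvDedup (seen : List String) : List (List String) → List (List String)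
  | [] => []
  | c :: t =>
    if PySem.Str.join " -> " c ∈ seen then pvDedup seen t
    else c :: pvDedup (seen ++ [PySem.Str.join " -> " c]) t

theorem pvDedup_congr (s : List (List String)) :
    ∀ (s1 s2 : List String), (∀ k, k ∈ s1 ↔ k ∈ s2) → pvDedup s1 s = pvDedup s2 s := by
  induction s with
  | nil => intro s1 s2 _; rfl
  | cons c t ih =>
    intro s1 s2 h
    simp only [pvDedup]
    by_cases hk : PySem.Str.join " -> " c ∈ s1
    · rw [if_pos hk, if_pos ((h _).mp hk)]
      exact ih s1 s2 h
    · rw [if_neg hk, if_neg (fun hx => hk ((h _).mpr hx))]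
      rw [ih (s1 ++ [PySem.Str.join " -> " c]) (s2 ++ [PySem.Str.join " -> " c])
        (fun k => by simp [h k])]

-- A's seen-set fold computes pvDedup
theorem pv_foldSeen (s : List (List String)) :
    ∀ (S : PySem.Set String) (seen : List String) (acc : List (List String)),
    (∀ k, S.contains k = true ↔ k ∈ seen) →
    (s.foldl (fun (st : PySem.Set String × List (List String)) chain =>
        let key := PySem.Str.join " -> " chain
        if st.1.contains key then st else (st.1.add key, st.2 ++ [chain])) (S, acc)).2
      = acc ++ pvDedup seen s := by
  induction s with
  | nil => intro S seen acc _; simp [pvDedup]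
  | cons c t ih =>
    intro S seen acc h
    simp only [List.foldl_cons, pvDedup]
    by_cases hk : PySem.Str.join " -> " c ∈ seen
    · have hS : S.contains (PySem.Str.join " -> " c) = true := (h _).mpr hk
      rw [if_pos hk]
      rw [if_pos hS]
      exact ih S seen acc h
    · have hS : S.contains (PySem.Str.join " -> " c) = false := by
        cases hcs : S.contains (PySem.Str.join " -> " c) with
        | false => rfl
        | true => exact absurd ((h _).mp hcs) hk
      rw [if_neg hk]
      rw [if_neg (by rw [hS]; simp)]
      have := ih (S.add (PySem.Str.join " -> " c)) (seen ++ [PySem.Str.join " -> " c])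
        (acc ++ [c]) (fun k => by
          rw [pv_set_contains_iff]
          rw [PySem.Set.mem_add]
          constructor
          · rintro (hx | hx)
            · exact List.mem_append.mpr (Or.inl ((h k).mp (pv_set_contains_iff.mpr hx)))
            · simp [hx]
          · intro hx
            rcases List.mem_append.mp hx with hx | hx
            · exact Or.inl (pv_set_contains_iff.mp ((h k).mpr hx))
            · simp only [List.mem_singleton] at hx; exact Or.inr hx)
      rw [this]
      simp

-- B's first-index filter computes pvDedup
theorem pv_enumDedup (s : List (List String)) :
    ∀ (pre : List String),
    ((PySem.List.enumerate s (pre.length : Int)).filter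
        (fun p => ((PySem.List.index? (pre ++ s.map (fun c => PySem.Str.join " -> " c))
            (PySem.Str.join " -> " p.2)).map (fun (n : Nat) => (n : Int))) == some p.1)).map
        (fun p => p.2)
      = pvDedup pre s := by
  induction s with
  | nil => intro pre; simp [pvDedup, PySem.List.enumerate_nil]
  | cons c t ih =>
    intro pre
    rw [List.map_cons, PySem.List.enumerate_cons, List.filter_cons]
    by_cases hk : PySem.Str.join " -> " c ∈ pre
    · -- the key occurs earlier: its first index is < pre.length, head dropped
      have hidx : PySem.List.index?
          (pre ++ PySem.Str.join " -> " c :: t.map (fun c => PySem.Str.join " -> " c))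
          (PySem.Str.join " -> " c) = PySem.List.index? pre (PySem.Str.join " -> " c) :=
        PySem.List.index?_append_of_mem _ hk
      obtain ⟨j, hj⟩ := Option.isSome_iff_exists.mp
        ((PySem.List.index?_isSome_iff _ _).mpr hk)
      obtain ⟨hjlt, -, -⟩ := PySem.List.getElem_of_index?_eq_some hj
      have hcond : ((PySem.List.index?
          (pre ++ PySem.Str.join " -> " c :: t.map (fun c => PySem.Str.join " -> " c))
          (PySem.Str.join " -> " c)).map (fun (n : Nat) => (n : Int)) == some ((pre.length : Nat) : Int))
          = false := by
        rw [hidx, hj]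
        simp only [Option.map_some, beq_eq_false_iff_ne, ne_eq, Option.some.injEq, Nat.cast_inj]
        omega
      simp only [hcond, Bool.false_eq_true, if_false]
      have hL : pre ++ PySem.Str.join " -> " c :: t.map (fun c => PySem.Str.join " -> " c)
          = (pre ++ [PySem.Str.join " -> " c]) ++ t.map (fun c => PySem.Str.join " -> " c) := by
        simp
      have hlen : (pre.length : Int) + 1 = ((pre ++ [PySem.Str.join " -> " c]).length : Int) := by
        simp
      rw [hL, hlen, ih (pre ++ [PySem.Str.join " -> " c])]
      rw [pvDedup]
      rw [if_pos hk]
      exact pvDedup_congr t _ _ (fun k => by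
        constructor
        · intro hx
          rcases List.mem_append.mp hx with hx | hx
          · exact hx
          · simp only [List.mem_singleton] at hx; subst hx; exact hk
        · intro hx; exact List.mem_append.mpr (Or.inl hx))
    · -- fresh key: its first index is exactly pre.length, head kept
      have hidx : PySem.List.index?
          (pre ++ PySem.Str.join " -> " c :: t.map (fun c => PySem.Str.join " -> " c))
          (PySem.Str.join " -> " c) = some pre.length := by
        have hL : pre ++ PySem.Str.join " -> " c :: t.map (fun c => PySem.Str.join " -> " c)
            = (pre ++ [PySem.Str.join " -> " c]) ++ t.map (fun c => PySem.Str.join " -> " c) := by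
          simp
        rw [hL, PySem.List.index?_append_of_mem _ (by simp)]
        exact PySem.List.index?_append_singleton_self _ _ hk
      have hcond : ((PySem.List.index?
          (pre ++ PySem.Str.join " -> " c :: t.map (fun c => PySem.Str.join " -> " c))
          (PySem.Str.join " -> " c)).map (fun (n : Nat) => (n : Int)) == some ((pre.length : Nat) : Int))
          = true := by
        rw [hidx]
        simp
      simp only [hcond, if_true]
      rw [List.map_cons]
      have hL : pre ++ PySem.Str.join " -> " c :: t.map (fun c => PySem.Str.join " -> " c)
          = (pre ++ [PySem.Str.join " -> " c]) ++ t.map (fun c => PySem.Str.join " -> " c) := by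
        simp
      have hlen : (pre.length : Int) + 1 = ((pre ++ [PySem.Str.join " -> " c]).length : Int) := by
        simp
      rw [hL, hlen, ih (pre ++ [PySem.Str.join " -> " c])]
      rw [pvDedup, if_neg hk]

-- ===== VERDICT (by name: the statement is the Claim_ definition above) =====
set_option maxHeartbeats 2000000 in
theorem find_data_chains_py_spec : Claim_equal_find_data_chains_py := by
  intro edges root_tables all_tables max_depth _
  unfold Spec_find_data_chains_py find_data_chains_py find_data_chains_py_alt
  have hroots : PySem.List.slice root_tables none (some 5) = root_tables.take 5 := by
    rw [PySem.List.slice_to root_tables (b := 5) (by norm_num)]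
    rfl
  have hchains :
      (root_tables.take 5).foldl
        (fun chains root =>
          pvA_bfs (pvA_radj edges) max_depth (edges.length + 1)
            (PySem.Set.ofList [root]) [[root]] chains) []
      = (root_tables.take 5).foldl
        (fun chains root =>
          pvB_bfs edges max_depth (edges.length + 1)
            (PySem.Dict.empty.insert root none) (PySem.Dict.empty.insert root 1)
            (PySem.Set.ofList [root]) [root] chains) [] := by
    apply List.foldl_ext
    intro acc root _
    have hinit : PvQInv (PySem.Dict.empty.insert root none)
        (PySem.Dict.empty.insert root 1) (PySem.Set.ofList [root]) [root] root := by
      refine ⟨PvChain.stop root (PySem.Dict.getD_insert_self _ _ _ _), by simp, ?_, ?_⟩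
      · intro m hm
        simp only [List.mem_singleton] at hm
        subst hm
        refine ⟨by rw [PySem.Dict.contains_insert]; simp, ?_⟩
        rw [pv_set_contains_iff]
        simp [PySem.Set.mem_ofList]
      · rw [PySem.Dict.getD_insert_self]; rfl
    exact pv_bfs_sync edges max_depth (edges.length + 1) _ _ _ _ _ acc
      (List.forall₂_cons.mpr ⟨hinit, List.Forall₂.nil⟩)
  simp only []
  rw [hroots, hchains, pv_sort_eq]
  rw [pv_foldSeen _ PySem.Set.empty [] [] (fun k => by
    constructor
    · intro h; cases h
    · intro h; cases h)]
  have henum := pv_enumDedup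
    (PySem.List.sorted ((root_tables.take 5).foldl
      (fun chains root =>
        pvB_bfs edges max_depth (edges.length + 1)
          (PySem.Dict.empty.insert root none) (PySem.Dict.empty.insert root 1)
          (PySem.Set.ofList [root]) [root] chains) []) (fun c => -((c.length : Int))) false)
    []
  simp only [List.length_nil, Nat.cast_zero, List.nil_append] at henum
  rw [henum]
  rw [PySem.List.slice_to _ (b := 10) (by norm_num)]
  simp
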